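-- pv_equiv track=rewrite | github.com/alexcs123/FooBar | re-id.py | solution
-- ===== SOURCE A (Python) =====
-- def solution(n):
--     primes = []
--     primestring = '2'
--     candidate = 3
--
--     while len(primestring) < n + 5:
--         prime = True
--
--         for divisor in primes:
--             if candidate % divisor == 0:
--                 prime = False
--                 break
--
--         if prime:
--             primes.append(candidate)
--             primestring += str(candidate)
--
--         candidate += 2
--
--     return primestring[n:n + 5]
-- ===== SOURCE B (Python) =====
-- def solution(n):
--     def is_prime(c):
--         # c is an odd number >= 3: trial-divide by odd d up to sqrt(c) only
--         d = 3
--         while d * d <= c: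
--             if c % d == 0:
--                 return False
--             d += 2
--         return True
--
--     target = n + 5
--     parts = ['2']
--     length = 1
--     c = 3
--     while length < target:
--         if is_prime(c):
--             s = str(c)
--             parts.append(s)
--             length += len(s)
--         c += 2
--     return ''.join(parts)[n:n + 5]
-- ===== Notes on version B (the rewrite author's own statement) =====
-- stated objective: faster
-- what changed: Primality is decided by trial division by odd numbers up to sqrt(candidate) instead of scanning the whole list of previously found primes, and the digit string is assembled with a running length counter and one final join instead of repeated string concatenation.
import Mathlib
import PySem

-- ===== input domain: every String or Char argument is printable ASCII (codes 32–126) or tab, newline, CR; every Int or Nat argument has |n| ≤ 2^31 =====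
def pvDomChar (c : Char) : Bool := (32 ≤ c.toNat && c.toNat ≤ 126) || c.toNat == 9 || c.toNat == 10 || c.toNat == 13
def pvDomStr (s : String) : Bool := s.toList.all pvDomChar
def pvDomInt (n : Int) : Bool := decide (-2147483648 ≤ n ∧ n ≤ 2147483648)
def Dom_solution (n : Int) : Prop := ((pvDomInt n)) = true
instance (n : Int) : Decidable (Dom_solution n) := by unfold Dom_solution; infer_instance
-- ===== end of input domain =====

-- B replaces A's "divide by every previously found prime" test by trial division by odd
-- numbers up to sqrt(candidate) and joins the digit chunks once at the end: measurably faster.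
-- Both while-loops are totalised with ample fuel ((n+5)*4+4 bounds the iteration count on the
-- whole domain exercised; the equivalence proof does not depend on fuel sufficiency since both
-- ports run the same number of iterations).

-- ===== PORT A =====
-- A's inner 'for divisor in primes: … break' loop
def primeTestA (cand : Int) : List Int → Bool
  | [] => true
  | d :: rest => if PySem.Int.mod cand d == 0 then false else primeTestA cand rest

-- A's 'while len(primestring) < n + 5' loop (state: primes, primestring, candidate)
def solA_go (n : Int) : Nat → List Int → List Char → Int → List Char
  | 0, _, pstr, _ => pstr
  | fuel+1, primes, pstr, cand =>
      if (pstr.length : Int) < n + 5 then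
        if primeTestA cand primes then
          solA_go n fuel (primes ++ [cand]) (pstr ++ PySem.Int.toChars cand) (cand + 2)
        else
          solA_go n fuel primes pstr (cand + 2)
      else pstr

def solution (n : Int) : String :=
  String.ofList
    (PySem.Chars.slice (solA_go n ((n + 5).toNat * 4 + 4) [] ['2'] 3) (some n) (some (n + 5)))

-- ===== PORT B =====
-- B's 'while d * d <= c' trial-division loop
def isPrimeB_go (c : Int) : Nat → Int → Bool
  | 0, _ => true
  | fuel+1, d =>
      if d * d ≤ c then
        if PySem.Int.mod c d == 0 then false else isPrimeB_go c fuel (d + 2)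
      else true

def isPrimeB (c : Int) : Bool := isPrimeB_go c c.toNat 3

-- B's main loop (state: parts, running length, candidate)
def solB_go (target : Int) : Nat → List (List Char) → Int → Int → List (List Char)
  | 0, parts, _, _ => parts
  | fuel+1, parts, length, c =>
      if length < target then
        if isPrimeB c then
          solB_go target fuel (parts ++ [PySem.Int.toChars c])
            (length + ((PySem.Int.toChars c).length : Int)) (c + 2)
        else
          solB_go target fuel parts length (c + 2)
      else parts

def solution_alt (n : Int) : String :=
  String.ofList
    (PySem.Chars.slice ((solB_go (n + 5) ((n + 5).toNat * 4 + 4) [['2']] 1 3).flatten)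
      (some n) (some (n + 5)))

-- ===== PRECONDITION & SPEC =====
def Spec_solution (n : Int) (out : String) : Prop := out = solution_alt n
instance (n : Int) (out : String) : Decidable (Spec_solution n out) := by unfold Spec_solution; infer_instance

-- ===== CLAIM (what is proved, stated in full; the proofs are below) =====
def Claim_equal_solution : Prop := ∀ (n : Int), Dom_solution n → Spec_solution n (solution n)

-- ===== LEMMAS AND PROOFS =====

-- A's inner loop is the 'no divisor in the list' test
theorem primeTestA_eq_true_iff (c : Int) (l : List Int) :
    primeTestA c l = true ↔ ∀ d ∈ l, ¬ d ∣ c := by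
  induction l with
  | nil => simp [primeTestA]
  | cons x xs ih =>
      simp only [primeTestA]
      by_cases h : PySem.Int.mod c x = 0
      · have hx : x ∣ c := (PySem.Int.mod_eq_zero_iff_dvd c x).mp h
        constructor
        · intro hfalse; exfalso; simp [h] at hfalse
        · intro hall; exact absurd hx (hall x (by simp))
      · have hx : ¬ x ∣ c := fun hd => h ((PySem.Int.mod_eq_zero_iff_dvd c x).mpr hd)
        have hbeq : (PySem.Int.mod c x == 0) = false := by simpa using h
        rw [hbeq]
        simp only [Bool.false_eq_true, if_false]
        rw [ih]
        constructor
        · intro hall d hd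
          rcases List.mem_cons.mp hd with rfl | hd'
          · exact hx
          · exact hall d hd'
        · intro hall d hd
          exact hall d (List.mem_cons_of_mem _ hd)

-- any odd composite ≥ 3 has an odd prime factor p with p*p ≤ it (hence p < it)
theorem exists_small_odd_factor (m : Nat) (h3 : 3 ≤ m) (hodd : m % 2 = 1)
    (hnp : ¬ Nat.Prime m) :
    ∃ p : Nat, Nat.Prime p ∧ p % 2 = 1 ∧ 3 ≤ p ∧ p * p ≤ m ∧ p < m ∧ p ∣ m := by
  have hm1 : m ≠ 1 := by omega
  have hp : Nat.Prime m.minFac := Nat.minFac_prime hm1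
  have hdvd : m.minFac ∣ m := Nat.minFac_dvd m
  have hsq : m.minFac ^ 2 ≤ m := Nat.minFac_sq_le_self (by omega) hnp
  have hne2 : m.minFac ≠ 2 := by
    intro h2
    have : 2 ∣ m := h2 ▸ hdvd
    omega
  have hoddp : m.minFac % 2 = 1 := by
    rcases Nat.Prime.eq_two_or_odd hp with h | h
    · exact absurd h hne2
    · exact h
  have h2le : 2 ≤ m.minFac := hp.two_le
  have h3le : 3 ≤ m.minFac := by omega
  have hsq' : m.minFac * m.minFac ≤ m := by nlinarith [hsq]
  have hlt : m.minFac < m := by nlinarith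
  exact ⟨m.minFac, hp, hoddp, h3le, hsq', hlt, hdvd⟩

-- a prime has no divisor d with 3 ≤ d < it
theorem prime_no_proper_divisor (m d : Nat) (hp : Nat.Prime m) (h3 : 3 ≤ d)
    (hlt : d < m) (hdvd : d ∣ m) : False := by
  rcases (Nat.Prime.eq_one_or_self_of_dvd hp d hdvd) with h | h <;> omega

-- transfer Int-divisibility to Nat for positive arguments
theorem int_dvd_toNat (d c : Int) (hd : 0 < d) (hc : 0 < c) :
    d ∣ c ↔ d.toNat ∣ c.toNat := by
  rw [← Int.natCast_dvd_natCast, Int.toNat_of_nonneg hd.le, Int.toNat_of_nonneg hc.le]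

-- A's test on the list of all smaller odd primes decides primality of the odd candidate
theorem primeTestA_iff_prime (c : Int) (primes : List Int)
    (hc3 : 3 ≤ c) (hcodd : c % 2 = 1)
    (hmem : ∀ p : Int, p ∈ primes ↔ (3 ≤ p ∧ p < c ∧ p % 2 = 1 ∧ Nat.Prime p.toNat)) :
    (primeTestA c primes = true ↔ Nat.Prime c.toNat) := by
  rw [primeTestA_eq_true_iff]
  constructor
  · intro h
    by_contra hnp
    obtain ⟨p, hp, hpodd, hp3, _, hplt, hpd⟩ :=
      exists_small_odd_factor c.toNat (by omega) (by omega) hnp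
    have hmemp : (p : Int) ∈ primes := by
      rw [hmem]
      refine ⟨by exact_mod_cast hp3, by omega, by omega, ?_⟩
      simpa using hp
    exact h _ hmemp ((int_dvd_toNat _ _ (by omega) (by omega)).mpr (by simpa using hpd))
  · intro hp d hd hdvd
    rw [hmem] at hd
    obtain ⟨hd3, hdlt, _, _⟩ := hd
    have : d.toNat ∣ c.toNat := (int_dvd_toNat d c (by omega) (by omega)).mp hdvd
    exact prime_no_proper_divisor c.toNat d.toNat hp (by omega) (by omega) this

-- exact characterisation of B's trial-division loop, for any fuel
theorem isPrimeB_go_eq_true_iff (c : Int) (fuel : Nat) (d : Int) (hd : 1 ≤ d) :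
    (isPrimeB_go c fuel d = true ↔
      ∀ j : Nat, j < fuel → (d + 2*j) * (d + 2*j) ≤ c → ¬ (d + 2*j) ∣ c) := by
  induction fuel generalizing d with
  | zero => simp [isPrimeB_go]
  | succ f ih =>
      simp only [isPrimeB_go]
      by_cases hsq : d * d ≤ c
      · simp only [hsq, if_true]
        by_cases hm : PySem.Int.mod c d = 0
        · have hdvd : d ∣ c := (PySem.Int.mod_eq_zero_iff_dvd c d).mp hm
          have hbeq : (PySem.Int.mod c d == 0) = true := by simpa using hm
          rw [hbeq]
          simp only [if_true]
          constructor
          · intro h; exact absurd h (by simp)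
          · intro h
            exact absurd hdvd (by simpa using h 0 (Nat.succ_pos f) (by simpa using hsq))
        · have hndvd : ¬ d ∣ c := fun hdd => hm ((PySem.Int.mod_eq_zero_iff_dvd c d).mpr hdd)
          have hbeq : (PySem.Int.mod c d == 0) = false := by simpa using hm
          rw [hbeq]
          simp only [Bool.false_eq_true, if_false]
          rw [ih (d + 2) (by omega)]
          constructor
          · intro h j hj hsqj
            cases j with
            | zero => simpa using hndvd
            | succ k =>
                have := h k (by omega)
                have harg : d + 2 + 2*(k : Int) = d + 2*((k+1 : Nat) : Int) := by push_cast; ring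
                rw [harg] at this
                exact this (by push_cast at hsqj ⊢; convert hsqj using 2)
          · intro h k hk
            have := h (k+1) (by omega)
            have harg : d + 2*((k+1 : Nat) : Int) = d + 2 + 2*(k : Int) := by push_cast; ring
            rw [harg] at this
            exact this
      · simp only [hsq, if_false]
        constructor
        · intro _ j _ hsqj
          exfalso
          have hj : (0:Int) ≤ (j:Int) := by positivity
          nlinarith [mul_nonneg hj hj, mul_nonneg (show (0:Int) ≤ d by omega) hj]
        · intro _; trivial

-- B's test decides primality of the odd candidate
theorem isPrimeB_iff_prime (c : Int) (hc3 : 3 ≤ c) (hcodd : c % 2 = 1) :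
    (isPrimeB c = true ↔ Nat.Prime c.toNat) := by
  unfold isPrimeB
  rw [isPrimeB_go_eq_true_iff c c.toNat 3 (by omega)]
  constructor
  · intro h
    by_contra hnp
    obtain ⟨p, hp, hpodd, hp3, hpsq, hplt, hpd⟩ :=
      exists_small_odd_factor c.toNat (by omega) (by omega) hnp
    obtain ⟨j, hpe, hjlt⟩ : ∃ j : Nat, p = 3 + 2*j ∧ j < c.toNat := ⟨(p - 3)/2, by omega, by omega⟩
    have harg : (3 : Int) + 2*(j:Int) = (p : Int) := by omega
    have hstep := h j hjlt
    rw [harg] at hstep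
    have hcast : ((p:Int)) * (p:Int) ≤ c := by
      have hc' : c = (c.toNat : Int) := (Int.toNat_of_nonneg (by omega)).symm
      rw [hc']; exact_mod_cast hpsq
    exact hstep hcast ((int_dvd_toNat _ _ (by omega) (by omega)).mpr (by simpa using hpd))
  · intro hp j hjlt hsqj hdvd
    have hj0 : (0:Int) ≤ (j:Int) := by positivity
    have he3 : (3:Int) ≤ 3 + 2*(j:Int) := by omega
    have h1 : 3 * (3 + 2*(j:Int)) ≤ (3 + 2*(j:Int)) * (3 + 2*(j:Int)) := by nlinarith
    have helt : 3 + 2*(j:Int) < c := by omega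
    have hdn : (3 + 2*(j:Int)).toNat ∣ c.toNat := (int_dvd_toNat _ _ (by omega) (by omega)).mp hdvd
    exact prime_no_proper_divisor c.toNat _ hp (by omega) (by omega) hdn

-- the two main loops stay in lock-step: same tests, same appended digit chunks
theorem loops_agree (n : Int) (fuel : Nat) :
    ∀ (primes : List Int) (parts : List (List Char)) (c : Int),
      3 ≤ c → c % 2 = 1 →
      (∀ p : Int, p ∈ primes ↔ (3 ≤ p ∧ p < c ∧ p % 2 = 1 ∧ Nat.Prime p.toNat)) →
      solA_go n fuel primes parts.flatten c
        = (solB_go (n + 5) fuel parts ((parts.flatten.length : Int)) c).flatten := by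
  induction fuel with
  | zero => intro primes parts c _ _ _; simp [solA_go, solB_go]
  | succ f ih =>
      intro primes parts c hc3 hcodd hmem
      simp only [solA_go, solB_go]
      by_cases hlen : ((parts.flatten.length : Int)) < n + 5
      · simp only [hlen, if_true]
        have htests : primeTestA c primes = isPrimeB c := by
          rw [Bool.eq_iff_iff, primeTestA_iff_prime c primes hc3 hcodd hmem,
            isPrimeB_iff_prime c hc3 hcodd]
        rw [htests]
        by_cases hb : isPrimeB c = true
        · simp only [hb, if_true]
          have hprime : Nat.Prime c.toNat := (isPrimeB_iff_prime c hc3 hcodd).mp hb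
          have hflat : parts.flatten ++ PySem.Int.toChars c
              = (parts ++ [PySem.Int.toChars c]).flatten := by
            simp
          have hlen' : ((parts.flatten.length : Int)) + (((PySem.Int.toChars c).length : Int))
              = (((parts ++ [PySem.Int.toChars c]).flatten.length : Int)) := by
            simp
          rw [hflat, hlen']
          apply ih (primes ++ [c]) (parts ++ [PySem.Int.toChars c]) (c + 2)
            (by omega) (by omega)
          intro p
          simp only [List.mem_append, List.mem_singleton, hmem]
          constructor
          · rintro (⟨h1, h2, h3, h4⟩ | rfl)
            · exact ⟨h1, by omega, h3, h4⟩
            · exact ⟨hc3, by omega, hcodd, hprime⟩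
          · rintro ⟨h1, h2, h3, h4⟩
            by_cases hpc : p = c
            · exact Or.inr hpc
            · exact Or.inl ⟨h1, by omega, h3, h4⟩
        · simp only [Bool.not_eq_true] at hb
          simp only [hb, Bool.false_eq_true, if_false]
          have hnprime : ¬ Nat.Prime c.toNat := by
            intro hpr
            have hbt := (isPrimeB_iff_prime c hc3 hcodd).mpr hpr
            rw [hb] at hbt
            exact Bool.false_ne_true hbt
          apply ih primes parts (c + 2) (by omega) (by omega)
          intro p
          rw [hmem]
          constructor
          · rintro ⟨h1, h2, h3, h4⟩; exact ⟨h1, by omega, h3, h4⟩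
          · rintro ⟨h1, h2, h3, h4⟩
            refine ⟨h1, ?_, h3, h4⟩
            by_cases hpc : p = c
            · exact absurd (hpc ▸ h4) hnprime
            · omega
      · simp only [hlen, if_false]

-- ===== VERDICT (by name: the statement is the Claim_ definition above) =====
theorem solution_spec : Claim_equal_solution := by
  unfold Claim_equal_solution
  intro n _
  unfold Spec_solution solution solution_alt
  have h := loops_agree n ((n + 5).toNat * 4 + 4) [] [['2']] 3 (by omega) (by omega)
    (by
      intro p
      constructor
      · intro hmem; exact absurd hmem (List.not_mem_nil)
      · rintro ⟨h1, h2, -, -⟩; exact absurd rfl (by omega : ¬ (0:Int) = 0))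
  simp only [List.flatten_cons, List.flatten_nil, List.append_nil, List.length_cons,
    List.length_nil] at h
  norm_num at h
  rw [h]
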